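-- pv_equiv track=rewrite | github.com/comalvirdi/CPE101 | LAB7/groups/test.py | func
-- ===== SOURCE A (Python) =====
-- def func(l1, val =60):
-- 	res = []
-- 	for x in l1:
-- 		p = True
-- 		for y in x:
-- 			if y<val:
-- 				p = False
-- 				break
-- 		res.append(p)
-- 	return res
-- ===== SOURCE B (Python) =====
-- def func(l1, val=60):
--     bad = {i for i, x in enumerate(l1) for y in x if y < val}
--     return [i not in bad for i in range(len(l1))]
-- ===== Notes on version B (the rewrite author's own statement) =====
-- stated objective: alternative
-- what changed: Two-stage algorithm: first build a set of indices of rows containing an element below val (one flat set comprehension over enumerate), then emit the result by testing each row index for membership in that set over range(len(l1)), instead of A's per-row flag-and-break inner scan.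
import Mathlib
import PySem

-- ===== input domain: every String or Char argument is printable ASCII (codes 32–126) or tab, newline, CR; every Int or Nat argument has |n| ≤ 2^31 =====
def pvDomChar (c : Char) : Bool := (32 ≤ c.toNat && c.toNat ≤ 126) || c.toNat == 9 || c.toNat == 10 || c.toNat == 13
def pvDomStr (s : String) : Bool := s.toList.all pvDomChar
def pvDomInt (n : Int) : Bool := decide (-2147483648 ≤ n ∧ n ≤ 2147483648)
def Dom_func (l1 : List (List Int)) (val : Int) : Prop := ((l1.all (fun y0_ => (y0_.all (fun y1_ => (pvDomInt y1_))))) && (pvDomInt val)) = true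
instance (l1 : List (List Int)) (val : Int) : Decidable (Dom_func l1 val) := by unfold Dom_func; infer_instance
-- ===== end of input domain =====

-- B is a two-stage algorithm: build a set of indices of rows with an element below
-- val, then answer each row index by membership in that set (objective: alternative).
-- ===== PORT A =====
-- inner loop of A: p = True; for y in x: if y < val: p = False; break
def funcInner (val : Int) : List Int → Bool
  | [] => true
  | y :: rest => if y < val then false else funcInner val rest

def func (l1 : List (List Int)) (val : Int) : List Bool :=
  l1.foldl (fun res x => res ++ [funcInner val x]) []

-- ===== PORT B =====
-- bad = {i for i, x in enumerate(l1) for y in x if y < val}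
def badSet (l1 : List (List Int)) (val : Int) : PySem.Set Int :=
  (PySem.List.enumerate l1 0).foldl
    (fun s p => p.2.foldl (fun s' y => if y < val then PySem.Set.add s' p.1 else s') s)
    PySem.Set.empty

-- return [i not in bad for i in range(len(l1))]
def func_alt (l1 : List (List Int)) (val : Int) : List Bool :=
  (PySem.List.pyRange 0 (l1.length : Int) 1).map
    (fun i => !(PySem.Set.contains (badSet l1 val) i))

-- ===== PRECONDITION & SPEC =====
def Spec_func (l1 : List (List Int)) (val : Int) (out : List Bool) : Prop := out = func_alt l1 val
instance (l1 : List (List Int)) (val : Int) (out : List Bool) : Decidable (Spec_func l1 val out) := by unfold Spec_func; infer_instance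

-- ===== CLAIM =====
def Claim_equal_func : Prop := ∀ (l1 : List (List Int)) (val : Int), Dom_func l1 val → Spec_func l1 val (func l1 val)

-- ===== LEMMAS AND PROOFS =====

lemma inner_mem (val j : Int) (x : List Int) :
    ∀ (s : PySem.Set Int) (z : Int),
    z ∈ x.foldl (fun s' y => if y < val then PySem.Set.add s' j else s') s ↔
      z ∈ s ∨ (z = j ∧ ∃ y ∈ x, y < val) := by
  induction x with
  | nil => simp
  | cons y t ih =>
    intro s z
    simp only [List.foldl_cons]
    by_cases h : y < val
    · rw [if_pos h, ih]
      simp only [PySem.Set.mem_add, List.mem_cons]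
      constructor
      · rintro (⟨hz | hz⟩ | ⟨hz, w, hw, hwv⟩)
        · exact Or.inl hz
        · exact Or.inr ⟨hz, y, Or.inl rfl, h⟩
        · exact Or.inr ⟨hz, w, Or.inr hw, hwv⟩
      · rintro (hz | ⟨hz, w, (rfl | hw), hwv⟩)
        · exact Or.inl (Or.inl hz)
        · exact Or.inl (Or.inr hz)
        · exact Or.inr ⟨hz, w, hw, hwv⟩
    · rw [if_neg h, ih]
      simp only [List.mem_cons]
      constructor
      · rintro (hz | ⟨hz, w, hw, hwv⟩)
        · exact Or.inl hz
        · exact Or.inr ⟨hz, w, Or.inr hw, hwv⟩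
      · rintro (hz | ⟨hz, w, (rfl | hw), hwv⟩)
        · exact Or.inl hz
        · exact absurd hwv h
        · exact Or.inr ⟨hz, w, hw, hwv⟩

lemma outer_mem (val : Int) :
    ∀ (l : List (List Int)) (n : Int) (s : PySem.Set Int) (z : Int),
    z ∈ (PySem.List.enumerate l n).foldl
        (fun s p => p.2.foldl (fun s' y => if y < val then PySem.Set.add s' p.1 else s') s) s ↔
      z ∈ s ∨ ∃ k : Nat, ∃ _ : k < l.length, z = n + k ∧ ∃ y ∈ l[k], y < val := by
  intro l
  induction l with
  | nil => simp [PySem.List.enumerate_nil]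
  | cons x t ih =>
    intro n s z
    rw [PySem.List.enumerate_cons, List.foldl_cons, ih, inner_mem]
    constructor
    · rintro ((hz | ⟨hz, hy⟩) | ⟨k, hk, hz, hy⟩)
      · exact Or.inl hz
      · exact Or.inr ⟨0, by simp, by simpa using hz, by simpa using hy⟩
      · refine Or.inr ⟨k + 1, by simpa using hk, by push_cast; omega, by simpa using hy⟩
    · rintro (hz | ⟨k, hk, hz, hy⟩)
      · exact Or.inl (Or.inl hz)
      · cases k with
        | zero => exact Or.inl (Or.inr ⟨by simpa using hz, by simpa using hy⟩)
        | succ k =>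
          refine Or.inr ⟨k, by simpa using hk, by push_cast at hz ⊢; omega, by simpa using hy⟩

lemma mem_badSet (l1 : List (List Int)) (val z : Int) :
    z ∈ badSet l1 val ↔ ∃ k : Nat, ∃ _ : k < l1.length, z = k ∧ ∃ y ∈ l1[k], y < val := by
  unfold badSet
  rw [outer_mem]
  simp [PySem.Set.empty]

lemma inner_false_iff (val : Int) (x : List Int) :
    funcInner val x = false ↔ ∃ y ∈ x, y < val := by
  induction x with
  | nil => simp [funcInner]
  | cons y t ih =>
    simp only [funcInner]
    by_cases h : y < val
    · simp [h]
    · simp [h, ih]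

lemma contains_badSet (l1 : List (List Int)) (val : Int) (k : Nat) (hk : k < l1.length) :
    PySem.Set.contains (badSet l1 val) (k : Int) = !(funcInner val l1[k]) := by
  by_cases h : ∃ y ∈ l1[k], y < val
  · rw [(inner_false_iff val l1[k]).2 h]
    simp only [Bool.not_false]
    rw [PySem.Set.contains_iff]
    exact (mem_badSet l1 val k).2 ⟨k, hk, rfl, h⟩
  · have hf : funcInner val l1[k] = true := by
      cases hb : funcInner val l1[k]
      · exact absurd ((inner_false_iff val l1[k]).1 hb) h
      · rfl
    rw [hf]
    simp only [Bool.not_true]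
    by_contra hc
    have : (k : Int) ∈ badSet l1 val := by
      rw [← PySem.Set.contains_iff]
      cases hb : PySem.Set.contains (badSet l1 val) (k : Int)
      · exact absurd hb hc
      · rfl
    obtain ⟨k', hk', hz, hy⟩ := (mem_badSet l1 val k).1 this
    have : k' = k := by omega
    subst this
    exact h hy

theorem func_spec : Claim_equal_func := by
  intro l1 val _
  unfold Spec_func func func_alt
  rw [PySem.List.foldl_append_singleton_eq_map, List.nil_append]
  rw [PySem.List.pyRange_one]
  simp only [Int.sub_zero, Int.toNat_natCast, List.map_map]
  apply List.ext_getElem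
  · simp
  · intro k h1 h2
    have hk : k < l1.length := by simpa using h1
    simp only [List.getElem_map, Function.comp, List.getElem_range]
    rw [show ((0 : Int) + (k : Int)) = (k : Int) by omega, contains_badSet l1 val k hk,
      Bool.not_not]
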